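-- pv_equiv track=rewrite | github.com/justinwhytcross/aa-cert-generator | core/template_generator.py | _get_item_report_details
-- ===== SOURCE A (Python) =====
-- def _get_item_report_details(item: dict, uploaded_reports: dict) -> list:
--     """Get report detail strings for an item based on its report_types.
--
--     Args:
--         item: Checklist item with report_types field
--         uploaded_reports: Dict mapping report type -> list of report dicts
--                          e.g. {"fire": [{"reference": "...", "company": "...", "date": "..."}]}
--
--     Returns:
--         List of detail strings like "Fire Engineering Report 20240243 FER V2 prepared by BSE dated 17 Dec 2024"
--     """
--     details = []
--     report_types = item.get("report_types", [])
--
--     report_type_labels = {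
--         "fire": "Fire Engineering Report",
--         "access": "Access Solutions Report",
--         "facade": "Facade Engineer Report",
--         "waterproofing": "Waterproofing Report",
--     }
--
--     for rtype in report_types:
--         reports = uploaded_reports.get(rtype, [])
--         for report in reports:
--             ref = report.get("reference", "")
--             company = report.get("company", "")
--             date = report.get("date", "")
--
--             label = report_type_labels.get(rtype, "Report")
--             parts = [label]
--             if ref:
--                 parts[0] = f"{label} {ref}"
--             if company:
--                 parts.append(f"prepared by {company}")
--             if date:
--                 parts.append(f"dated {date}")
--
--             detail = " ".join(parts)
--             if detail not in details:
--                 details.append(detail)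
--
--     return details
-- ===== SOURCE B (Python) =====
-- def _get_item_report_details(item: dict, uploaded_reports: dict) -> list:
--     """Recursive decomposition: a pure per-report formatter (truthy-filter join,
--     no mutated parts list), recursion over report_types producing one comprehension
--     per type, then one final order-preserving dedup pass."""
--     labels = {
--         "fire": "Fire Engineering Report",
--         "access": "Access Solutions Report",
--         "facade": "Facade Engineer Report",
--         "waterproofing": "Waterproofing Report",
--     }
--
--     def detail(rtype, report):
--         label = labels.get(rtype, "Report")
--         ref = report.get("reference", "")
--         company = report.get("company", "")
--         date = report.get("date", "")
--         head = f"{label} {ref}" if ref else label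
--         return " ".join(filter(None, [head,
--                                       company and f"prepared by {company}",
--                                       date and f"dated {date}"]))
--
--     def collect(rtypes):
--         if not rtypes:
--             return []
--         rt = rtypes[0]
--         return [detail(rt, rep) for rep in uploaded_reports.get(rt, [])] + collect(rtypes[1:])
--
--     return list(dict.fromkeys(collect(item.get("report_types", []))))
-- ===== Notes on version B (the rewrite author's own statement) =====
-- stated objective: alternative
-- what changed: B replaces A's imperative nested loop with in-loop membership dedup by a recursive decomposition: a pure per-report formatter that joins a truthy-filtered fixed list of fields (no mutated parts list), structural recursion over report_types that concatenates one comprehension per type, and a single final order-preserving dedup pass.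
import Mathlib
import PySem

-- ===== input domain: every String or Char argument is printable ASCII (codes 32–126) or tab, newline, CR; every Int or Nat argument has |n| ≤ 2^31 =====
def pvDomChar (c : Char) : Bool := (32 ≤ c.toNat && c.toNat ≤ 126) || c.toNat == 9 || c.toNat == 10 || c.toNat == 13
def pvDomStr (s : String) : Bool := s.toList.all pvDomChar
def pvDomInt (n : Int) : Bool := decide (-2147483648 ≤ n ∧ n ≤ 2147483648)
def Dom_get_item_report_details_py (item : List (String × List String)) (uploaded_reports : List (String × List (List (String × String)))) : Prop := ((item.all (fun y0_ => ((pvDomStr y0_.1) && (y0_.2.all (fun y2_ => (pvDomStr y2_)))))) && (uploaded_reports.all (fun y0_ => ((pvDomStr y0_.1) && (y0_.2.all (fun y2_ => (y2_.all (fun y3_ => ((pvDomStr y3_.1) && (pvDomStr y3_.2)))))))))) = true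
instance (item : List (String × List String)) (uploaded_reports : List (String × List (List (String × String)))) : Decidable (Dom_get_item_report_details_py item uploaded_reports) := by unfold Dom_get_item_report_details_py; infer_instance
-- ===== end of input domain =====

-- B replaces A's imperative nested loop (mutated parts list, in-loop membership
-- dedup) by a recursive decomposition: a pure per-report formatter joining a
-- truthy-filtered field list, recursion over report_types, one final dedup pass.

def pvLabels : PySem.Dict String String :=
  PySem.Dict.mk [("fire", "Fire Engineering Report"),
   ("access", "Access Solutions Report"),
   ("facade", "Facade Engineer Report"),
   ("waterproofing", "Waterproofing Report")]

-- ===== PORT A =====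
def get_item_report_details_py (item : List (String × List String)) (uploaded_reports : List (String × List (List (String × String)))) : List String :=
  let report_types := PySem.Dict.getD (PySem.Dict.mk item) "report_types" []
  report_types.foldl (fun details rtype =>
    let reports := PySem.Dict.getD (PySem.Dict.mk uploaded_reports) rtype []
    reports.foldl (fun details report =>
      let ref := PySem.Dict.getD (PySem.Dict.mk report) "reference" ""
      let company := PySem.Dict.getD (PySem.Dict.mk report) "company" ""
      let date := PySem.Dict.getD (PySem.Dict.mk report) "date" ""
      let label := PySem.Dict.getD pvLabels rtype "Report"
      let parts := [label]
      -- parts[0] = f"{label} {ref}"  (parts is the singleton [label] here)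
      let parts := if ref ≠ "" then [label ++ " " ++ ref] else parts
      let parts := if company ≠ "" then parts ++ ["prepared by " ++ company] else parts
      let parts := if date ≠ "" then parts ++ ["dated " ++ date] else parts
      let detail := PySem.Str.join " " parts
      if details.contains detail then details else details ++ [detail]) details) []

-- ===== PORT B =====
-- detail(rtype, report): pure formatter; `company and f"…"` is "" when company is ""
def pvDetailB (rtype : String) (report : List (String × String)) : String :=
  let label := PySem.Dict.getD pvLabels rtype "Report"
  let ref := PySem.Dict.getD (PySem.Dict.mk report) "reference" ""
  let company := PySem.Dict.getD (PySem.Dict.mk report) "company" ""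
  let date := PySem.Dict.getD (PySem.Dict.mk report) "date" ""
  let head := if ref ≠ "" then label ++ " " ++ ref else label
  PySem.Str.join " " (List.filter (fun s => decide (s ≠ ""))
    [head,
     if company ≠ "" then "prepared by " ++ company else "",
     if date ≠ "" then "dated " ++ date else ""])

-- collect(rtypes): structural recursion, one mapped block per report type
def pvCollectB (uploaded_reports : List (String × List (List (String × String)))) : List String → List String
  | [] => []
  | rt :: rest =>
      (PySem.Dict.getD (PySem.Dict.mk uploaded_reports) rt []).map (pvDetailB rt)
        ++ pvCollectB uploaded_reports rest

def get_item_report_details_py_alt (item : List (String × List String)) (uploaded_reports : List (String × List (List (String × String)))) : List String :=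
  PySem.List.dedup (pvCollectB uploaded_reports (PySem.Dict.getD (PySem.Dict.mk item) "report_types" []))

-- ===== PRECONDITION & SPEC =====
def Spec_get_item_report_details_py (item : List (String × List String)) (uploaded_reports : List (String × List (List (String × String)))) (out : List String) : Prop := out = get_item_report_details_py_alt item uploaded_reports
instance (item : List (String × List String)) (uploaded_reports : List (String × List (List (String × String)))) (out : List String) : Decidable (Spec_get_item_report_details_py item uploaded_reports out) := by unfold Spec_get_item_report_details_py; infer_instance

-- ===== CLAIM (what is proved, stated in full; the proofs are below) =====
def Claim_equal_get_item_report_details_py : Prop := ∀ (item : List (String × List String)) (uploaded_reports : List (String × List (List (String × String)))), Dom_get_item_report_details_py item uploaded_reports → Spec_get_item_report_details_py item uploaded_reports (get_item_report_details_py item uploaded_reports)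

-- ===== LEMMAS AND PROOFS =====

lemma pv_append_ne_empty (s t : String) (h : s ≠ "") : s ++ t ≠ "" := by
  intro he
  apply h
  have hd : s.toList ++ t.toList = ([] : List Char) := by
    simpa [String.toList_append] using congrArg String.toList he
  rcases List.append_eq_nil_iff.mp hd with ⟨hs, _⟩
  cases s; simp_all

lemma pvLabel_ne_empty (rtype : String) :
    PySem.Dict.getD pvLabels rtype "Report" ≠ "" := by
  have h : ∀ p ∈ pvLabels.items, (p : String × String).2 ≠ "" := by decide
  simp only [PySem.Dict.getD, PySem.Dict.get?]
  cases hf : List.find? (fun p => p.1 == rtype) pvLabels.items with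
  | none => decide
  | some p => simpa using h p (List.mem_of_find?_eq_some hf)

-- B's per-report formatter computes exactly A's per-report detail string
lemma pvDetailB_eq_A (rtype : String) (report : List (String × String)) :
    pvDetailB rtype report =
      (let ref := PySem.Dict.getD (PySem.Dict.mk report) "reference" ""
       let company := PySem.Dict.getD (PySem.Dict.mk report) "company" ""
       let date := PySem.Dict.getD (PySem.Dict.mk report) "date" ""
       let label := PySem.Dict.getD pvLabels rtype "Report"
       let parts := if ref ≠ "" then [label ++ " " ++ ref] else [label]
       let parts := if company ≠ "" then parts ++ ["prepared by " ++ company] else parts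
       let parts := if date ≠ "" then parts ++ ["dated " ++ date] else parts
       PySem.Str.join " " parts) := by
  simp only [pvDetailB]
  set ref := PySem.Dict.getD (PySem.Dict.mk report) "reference" "" with href
  set company := PySem.Dict.getD (PySem.Dict.mk report) "company" "" with hcomp
  set date := PySem.Dict.getD (PySem.Dict.mk report) "date" "" with hdate
  set label := PySem.Dict.getD pvLabels rtype "Report" with hlab
  have hlabne : label ≠ "" := pvLabel_ne_empty rtype
  congr 1
  by_cases hr : ref = "" <;> by_cases hc : company = "" <;> by_cases hd : date = "" <;>
    simp [List.filter, hr, hc, hd, hlabne,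
      pv_append_ne_empty (label ++ " ") ref (pv_append_ne_empty label " " hlabne),
      pv_append_ne_empty "prepared by " company (by decide),
      pv_append_ne_empty "dated " date (by decide)]

-- adding elements to a set one by one is ofList of the appended flat list
lemma pvFoldl_add_ofList {α β : Type} [BEq α] [LawfulBEq α] (f : β → α) :
    ∀ (l : List β) (acc : List α),
      l.foldl (fun d x => PySem.Set.add d (f x)) (PySem.Set.ofList acc)
        = PySem.Set.ofList (acc ++ l.map f) := by
  intro l
  induction l with
  | nil => intro acc; simp
  | cons h t ih =>
      intro acc
      simp only [List.foldl_cons]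
      have : PySem.Set.add (PySem.Set.ofList acc) (f h) = PySem.Set.ofList (acc ++ [f h]) := by
        rw [PySem.Set.ofList_eq_foldl, PySem.Set.ofList_eq_foldl, List.foldl_append]
        rfl
      rw [this, ih]
      simp

-- A's nested loop, over report types, is ofList of B's recursive collection
lemma pvNested_add_ofList (uploaded_reports : List (String × List (List (String × String)))) :
    ∀ (rtypes : List String) (acc : List String),
      rtypes.foldl (fun d rtype =>
          (PySem.Dict.getD (PySem.Dict.mk uploaded_reports) rtype []).foldl
            (fun d report => PySem.Set.add d (pvDetailB rtype report)) d)
        (PySem.Set.ofList acc)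
        = PySem.Set.ofList (acc ++ pvCollectB uploaded_reports rtypes) := by
  intro rtypes
  induction rtypes with
  | nil => intro acc; simp [pvCollectB]
  | cons h t ih =>
      intro acc
      simp only [List.foldl_cons]
      rw [pvFoldl_add_ofList (pvDetailB h), ih]
      simp [pvCollectB]

-- ===== VERDICT (by name: the statement is the Claim_ definition above) =====
theorem get_item_report_details_py_spec : Claim_equal_get_item_report_details_py := by
  intro item uploaded_reports _
  unfold Spec_get_item_report_details_py
  have hA : get_item_report_details_py item uploaded_reports
      = (PySem.Dict.getD (PySem.Dict.mk item) "report_types" []).foldl (fun d rtype =>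
          (PySem.Dict.getD (PySem.Dict.mk uploaded_reports) rtype []).foldl
            (fun d report => PySem.Set.add d (pvDetailB rtype report)) d) [] := by
    unfold get_item_report_details_py
    refine congrFun (congrFun (congrArg List.foldl ?_) []) _
    funext d rtype
    refine congrFun (congrFun (congrArg List.foldl ?_) d) _
    funext d' report
    rw [pvDetailB_eq_A]
    rfl
  rw [hA, get_item_report_details_py_alt, PySem.List.dedup_eq_ofList]
  exact pvNested_add_ofList uploaded_reports _ []
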